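-- pv_equiv track=rewrite | github.com/ankurnarkhede/Competitive-Programming | he-bitmanipulation-Special-Bit-Numbers.py | double_ones
-- ===== SOURCE A (Python) =====
-- def double_ones(num):
--     flag = 0
--     while (num):
--         if (num % 2 == 1):
--             flag += 1
--             num //= 2
--
--         elif (num % 2 == 0):
--             flag = 0
--             num //= 2
--
--         if (flag == 2):
--             return 1
--     if (flag < 2):
--         return 0
-- ===== SOURCE B (Python) =====
-- def double_ones(num):
--     return 1 if num & (num >> 1) else 0
-- ===== Notes on version B (the rewrite author's own statement) =====
-- stated objective: simpler
-- what changed: Replaces the digit-by-digit scanning loop with a run-counter by the closed-form overlap test num & (num >> 1): adjacent set bits exist iff the number overlaps its own right shift.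
import Mathlib
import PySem

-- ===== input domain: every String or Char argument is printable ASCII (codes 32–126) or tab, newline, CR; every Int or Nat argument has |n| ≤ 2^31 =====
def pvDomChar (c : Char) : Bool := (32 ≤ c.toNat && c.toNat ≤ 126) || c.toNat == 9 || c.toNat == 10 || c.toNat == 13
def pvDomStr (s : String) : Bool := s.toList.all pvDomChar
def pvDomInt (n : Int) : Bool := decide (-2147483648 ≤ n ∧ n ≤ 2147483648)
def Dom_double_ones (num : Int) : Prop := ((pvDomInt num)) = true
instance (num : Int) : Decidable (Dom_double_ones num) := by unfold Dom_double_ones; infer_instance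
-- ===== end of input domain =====

-- B replaces A's bit-scanning loop with the closed-form overlap test num & (num >> 1); objective: simpler.


-- ===== PORT A =====
-- A's while-loop, fuel-bounded; the fuel num.natAbs + 3 always suffices (each step halves
-- |num| except at num = -1, where the loop returns within two steps), so the 0-fuel branch
-- is unreachable — it is a totality guard, not an algorithm switch.
def doubleOnesLoop : Nat → Int → Int → Int
  | 0, _, _ => 0
  | fuel + 1, num, flag =>
    if num ≠ 0 then
      if PySem.Int.mod num 2 = 1 then
        let flag := flag + 1
        let num := PySem.Int.floordiv num 2
        if flag = 2 then 1 else doubleOnesLoop fuel num flag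
      else if PySem.Int.mod num 2 = 0 then
        let flag := (0 : Int)
        let num := PySem.Int.floordiv num 2
        if flag = 2 then 1 else doubleOnesLoop fuel num flag
      else -- unreachable: num % 2 is always 0 or 1 in Python; kept for branch-order fidelity
        if flag = 2 then 1 else doubleOnesLoop fuel num flag
    else
      -- Python: "if (flag < 2): return 0"; flag < 2 always holds here (flag = 2 returns inside
      -- the loop), so the value in the impossible else-branch (Python would return None) is 0 too
      if flag < 2 then 0 else 0

def double_ones (num : Int) : Int := doubleOnesLoop (num.natAbs + 3) num 0

-- ===== PORT B =====
def double_ones_alt (num : Int) : Int :=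
  if PySem.Int.band num (num >>> (1 : Nat)) ≠ 0 then 1 else 0

-- ===== PRECONDITION & SPEC =====
def Spec_double_ones (num : Int) (out : Int) : Prop := out = double_ones_alt num
instance (num : Int) (out : Int) : Decidable (Spec_double_ones num out) := by unfold Spec_double_ones; infer_instance

-- ===== CLAIM (what is proved, stated in full; the proofs are below) =====
def Claim_equal_double_ones : Prop := ∀ (num : Int), Dom_double_ones num → Spec_double_ones num (double_ones num)

-- ===== LEMMAS AND PROOFS =====

theorem pymod_two (a : Int) : PySem.Int.mod a 2 = a % 2 := by
  simp [PySem.Int.mod, Int.fmod_eq_emod]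

theorem pydiv_two (a : Int) : PySem.Int.floordiv a 2 = a / 2 := by
  simp [PySem.Int.floordiv, Int.fdiv_eq_ediv]

-- "has two adjacent set bits", recursively on the binary digits
def hasAdj (m : Nat) : Bool :=
  if h : m = 0 then false
  else if m % 4 = 3 then true
  else hasAdj (m / 2)
decreasing_by exact Nat.div_lt_self (Nat.pos_of_ne_zero h) one_lt_two

theorem land_ne_zero_iff (m n : Nat) :
    m &&& n ≠ 0 ↔ ∃ i, m.testBit i = true ∧ n.testBit i = true := by
  have key : m &&& n = 0 ↔ ∀ i, ¬(m.testBit i = true ∧ n.testBit i = true) := by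
    constructor
    · intro h i hi
      have ht : (m &&& n).testBit i = true := by
        rw [Nat.testBit_land]; simp [hi.1, hi.2]
      rw [h, Nat.zero_testBit] at ht
      exact Bool.false_ne_true ht
    · intro h
      apply Nat.eq_of_testBit_eq
      intro i
      rw [Nat.testBit_land, Nat.zero_testBit]
      cases hm : m.testBit i with
      | false => simp
      | true =>
        cases hn : n.testBit i with
        | false => simp
        | true => exact absurd ⟨hm, hn⟩ (h i)
  rw [ne_eq, key]
  exact not_forall_not

theorem hasAdj_iff (m : Nat) :
    hasAdj m = true ↔ ∃ i, m.testBit i = true ∧ m.testBit (i + 1) = true := by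
  induction m using Nat.strong_induction_on with
  | _ m ih =>
    by_cases h0 : m = 0
    · subst h0
      simp [hasAdj, Nat.zero_testBit]
    · by_cases h3 : m % 4 = 3
      · have hT : hasAdj m = true := by rw [hasAdj]; simp [h0, h3]
        rw [hT]
        refine iff_of_true rfl ⟨0, ?_, ?_⟩
        · rw [Nat.testBit_zero]
          simp only [decide_eq_true_eq]; omega
        · rw [Nat.testBit_succ, Nat.testBit_zero]
          simp only [decide_eq_true_eq]; omega
      · have hrec : hasAdj m = hasAdj (m / 2) := by
          rw [hasAdj]; simp [h0, h3]
        rw [hrec, ih (m / 2) (Nat.div_lt_self (Nat.pos_of_ne_zero h0) one_lt_two)]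
        constructor
        · rintro ⟨i, hi, hi1⟩
          refine ⟨i + 1, ?_, ?_⟩
          · rw [Nat.testBit_succ]; exact hi
          · rw [Nat.testBit_succ]; exact hi1
        · rintro ⟨i, hi, hi1⟩
          cases i with
          | zero =>
            exfalso
            rw [Nat.testBit_zero] at hi
            rw [Nat.testBit_succ, Nat.testBit_zero] at hi1
            simp only [decide_eq_true_eq] at hi hi1
            omega
          | succ j =>
            rw [Nat.testBit_succ] at hi hi1
            exact ⟨j, hi, hi1⟩

-- B's trick on nonnegative inputs computes hasAdj
theorem alt_nonneg_iff (m : Nat) :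
    PySem.Int.band (m : Int) ((m : Int) >>> (1 : Nat)) ≠ 0 ↔ hasAdj m = true := by
  have hsh : ((m : Int) >>> (1 : Nat)) = ((m / 2 : Nat) : Int) := by
    simp [Int.shiftRight_eq_div_pow]
  rw [hsh, PySem.Int.band_natCast]
  have : ((m &&& m / 2 : Nat) : Int) ≠ 0 ↔ (m &&& m / 2) ≠ 0 := by
    exact_mod_cast Iff.rfl
  rw [this, land_ne_zero_iff, hasAdj_iff]
  constructor
  · rintro ⟨i, hm, hd⟩
    exact ⟨i, hm, by rw [Nat.testBit_succ]; exact hd⟩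
  · rintro ⟨i, hm, hd⟩
    rw [Nat.testBit_succ] at hd
    exact ⟨i, hm, hd⟩

-- B's trick on negative inputs is nonzero (infinite two's-complement sign bits overlap)
theorem alt_neg (num : Int) (h : num < 0) :
    PySem.Int.band num (num >>> (1 : Nat)) ≠ 0 := by
  have hs : num >>> (1 : Nat) < 0 := by
    rw [Int.shiftRight_eq_div_pow]; omega
  unfold PySem.Int.band
  rw [if_neg (by omega), if_neg (by omega)]
  omega

-- A's loop on nonnegative input computes hasAdj (with the pending-run flag)
theorem loop_nonneg (fuel : Nat) :
    ∀ (m : Nat) (flag : Int), (flag = 0 ∨ flag = 1) → m + 1 ≤ fuel →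
      doubleOnesLoop fuel (m : Int) flag =
        if hasAdj m = true ∨ (flag = 1 ∧ m % 2 = 1) then 1 else 0 := by
  induction fuel with
  | zero => intro m flag _ hf; omega
  | succ f ih =>
    intro m flag hflag hf
    by_cases h0 : m = 0
    · subst h0
      have hA0 : hasAdj 0 = false := by rw [hasAdj]; simp
      simp [doubleOnesLoop, hA0]
    · have hne : (m : Int) ≠ 0 := by exact_mod_cast h0
      have hdiv : PySem.Int.floordiv (m : Int) 2 = ((m / 2 : Nat) : Int) := by
        rw [pydiv_two]; omega
      have hfu : m / 2 + 1 ≤ f := by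
        have := Nat.div_lt_self (Nat.pos_of_ne_zero h0) one_lt_two; omega
      by_cases hodd : m % 2 = 1
      · have hmod : PySem.Int.mod (m : Int) 2 = 1 := by
          rw [pymod_two]; omega
        rcases hflag with hfl | hfl <;> subst hfl
        · -- flag 0 → 1, then recurse
          simp only [doubleOnesLoop, hne, hmod, if_true, ne_eq, not_false_eq_true,
            hdiv, zero_add]
          rw [if_neg (by norm_num), ih (m / 2) 1 (Or.inr rfl) hfu]
          by_cases h21 : m / 2 % 2 = 1
          · have hT : hasAdj m = true := by
              rw [hasAdj]; simp [h0, show m % 4 = 3 by omega]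
            simp [h21, hT]
          · have hE : hasAdj m = hasAdj (m / 2) := by
              rw [hasAdj]; simp [h0, show ¬ m % 4 = 3 by omega]
            simp [h21, hE]
        · -- flag 1 → 2, return 1
          simp only [doubleOnesLoop, hne, hmod, if_true, ne_eq, not_false_eq_true, hdiv]
          rw [if_pos (by norm_num)]
          simp [hodd]
      · have hmod0 : PySem.Int.mod (m : Int) 2 = 0 := by rw [pymod_two]; omega
        have hmodne : ¬ PySem.Int.mod (m : Int) 2 = 1 := by rw [pymod_two]; omega
        simp only [doubleOnesLoop, hne, hmod0, if_true, ne_eq,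
          not_false_eq_true, hdiv]
        rw [if_neg (by norm_num), ih (m / 2) 0 (Or.inl rfl) hfu]
        have hE : hasAdj m = hasAdj (m / 2) := by
          rw [hasAdj]; simp [h0, show ¬ m % 4 = 3 by omega]
        simp [hE, hodd]

-- A's loop on negative input always returns 1 (the fuel budget is an inductive invariant)
theorem loop_neg (fuel : Nat) :
    ∀ (num flag : Int), num < 0 →
      ((flag = 0 ∧ ((num = -1 ∧ 2 ≤ fuel) ∨ num.natAbs + 2 ≤ fuel)) ∨
       (flag = 1 ∧ ((num = -1 ∧ 1 ≤ fuel) ∨ num.natAbs + 1 ≤ fuel))) →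
      doubleOnesLoop fuel num flag = 1 := by
  induction fuel with
  | zero => intro num flag hneg hb; omega
  | succ f ih =>
    intro num flag hneg hb
    have hne : num ≠ 0 := by omega
    have hfd : PySem.Int.floordiv num 2 = num / 2 := pydiv_two num
    have hdivlt : PySem.Int.floordiv num 2 < 0 := by omega
    by_cases hodd : PySem.Int.mod num 2 = 1
    · have hodd' : num % 2 = 1 := by rw [pymod_two] at hodd; exact hodd
      rcases hb with ⟨hfl, hfu⟩ | ⟨hfl, hfu⟩ <;> subst hfl
      · simp only [doubleOnesLoop, hne, hodd, if_true, ne_eq, not_false_eq_true]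
        rw [if_neg (by norm_num)]
        exact ih _ 1 hdivlt (Or.inr ⟨rfl, by omega⟩)
      · simp only [doubleOnesLoop, hne, hodd, if_true, ne_eq, not_false_eq_true]
        rw [if_pos (by norm_num)]
    · have hmod0 : PySem.Int.mod num 2 = 0 := by
        rw [pymod_two] at *; omega
      have heven : num % 2 = 0 := by rw [pymod_two] at hmod0; exact hmod0
      simp only [doubleOnesLoop, hne, hmod0, if_true, ne_eq, not_false_eq_true]
      rw [if_neg (by norm_num)]
      exact ih _ 0 hdivlt (Or.inl ⟨rfl, by omega⟩)

-- ===== VERDICT (by name: the statement is the Claim_ definition above) =====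
theorem double_ones_spec : Claim_equal_double_ones := by
  unfold Claim_equal_double_ones
  intro num _
  unfold Spec_double_ones double_ones double_ones_alt
  by_cases hneg : num < 0
  · rw [loop_neg _ num 0 hneg (Or.inl ⟨rfl, Or.inr (by omega)⟩), if_pos (alt_neg num hneg)]
  · rw [not_lt] at hneg
    obtain ⟨m, rfl⟩ : ∃ m : Nat, num = (m : Int) := ⟨num.toNat, by omega⟩
    rw [loop_nonneg _ m 0 (Or.inl rfl) (by simp)]
    by_cases hA : hasAdj m = true
    · rw [if_pos (Or.inl hA), if_pos ((alt_nonneg_iff m).mpr hA)]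
    · have hc : ¬ (hasAdj m = true ∨ (0 : Int) = 1 ∧ m % 2 = 1) := by
        rintro (h | ⟨h, -⟩)
        · exact hA h
        · norm_num at h
      rw [if_neg hc, if_neg (fun hb => hA ((alt_nonneg_iff m).mp hb))]
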